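-- pv_equiv track=rewrite | github.com/anfidthtn/BOJ | 백준/Gold/5425. 자리합/자리합.py | getDigitSum
-- ===== SOURCE A (Python) =====
-- def getDigitSum(num):
--     if num <= 0:
--         return 0
--     count = 0
--     now = 16
--     while num // 10 ** now <= 0:
--         now -= 1
--     for power in range(now, -1, -1):
--         digit = num // 10 ** power
--         for i in range(digit):
--             count += i * (10 ** power)
--             if power > 0:
--                 count += 45 * power * (10 ** (power - 1))
--         count += digit * ((num % (10 ** power)) + 1)
--         num %= 10 ** power
--     return count
-- ===== SOURCE B (Python) =====
-- def _digit_sum(n):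
--     s = 0
--     while n > 0:
--         s += n % 10
--         n //= 10
--     return s
--
--
-- def getDigitSum(num):
--     # S(n) = sum of digit sums of 1..n, by recursion on n // 10:
--     # group numbers by their value without the last digit.
--     if num <= 0:
--         return 0
--     q, r = divmod(num, 10)
--     return 10 * getDigitSum(q - 1) + 45 * q + (r + 1) * _digit_sum(q) + r * (r + 1) // 2
-- ===== Notes on version B (the rewrite author's own statement) =====
-- stated objective: simpler
-- what changed: Replaces A's find-top-power loop plus per-position inner digit loop with a single short recursion on num//10 (group numbers 1..num by their value without the last digit), using a plain digit-sum helper.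
import Mathlib
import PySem

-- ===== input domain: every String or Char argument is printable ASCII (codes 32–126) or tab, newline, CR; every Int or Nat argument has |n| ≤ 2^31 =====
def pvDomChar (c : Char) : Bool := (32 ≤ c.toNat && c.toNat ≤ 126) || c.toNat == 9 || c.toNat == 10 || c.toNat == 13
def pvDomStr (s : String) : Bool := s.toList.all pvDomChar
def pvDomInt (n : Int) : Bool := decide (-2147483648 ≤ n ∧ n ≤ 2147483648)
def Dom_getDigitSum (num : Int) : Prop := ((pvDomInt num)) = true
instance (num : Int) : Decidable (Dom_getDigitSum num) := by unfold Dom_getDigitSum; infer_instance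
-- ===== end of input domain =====

-- ===== PORT A =====
-- B changes: one short recursion on num // 10 instead of A's top-power search plus per-position inner loops (objective: simpler).

-- inner 'for i in range(digit)' loop of A
def pvInner (power : Nat) (digit : Int) (count : Int) : Int :=
  (PySem.List.pyRange 0 digit 1).foldl
    (fun c i =>
      c + i * (10 : Int) ^ power +
        (if 0 < power then 45 * (power : Int) * (10 : Int) ^ (power - 1) else 0))
    count

-- 'while num // 10 ** now <= 0: now -= 1' starting at now = 16 (num ≥ 1 keeps now ≥ 0)
def pvFindNow (num : Int) : Nat → Nat
  | 0 => 0
  | n + 1 => if PySem.Int.floordiv num ((10 : Int) ^ (n + 1)) ≤ 0 then pvFindNow num n else n + 1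

-- 'for power in range(now, -1, -1)' body, state (count, num)
def pvLoopA (power : Nat) (count num : Int) : Int :=
  let digit := PySem.Int.floordiv num ((10 : Int) ^ power)
  let c1 := pvInner power digit count
  let c2 := c1 + digit * (PySem.Int.mod num ((10 : Int) ^ power) + 1)
  let n1 := PySem.Int.mod num ((10 : Int) ^ power)
  match power with
  | 0 => c2
  | p + 1 => pvLoopA p c2 n1

def getDigitSum (num : Int) : Int :=
  if num ≤ 0 then 0 else pvLoopA (pvFindNow num 16) 0 num

-- ===== PORT B =====
-- '_digit_sum': repeated % 10 and // 10
def pvDigitSumB (n : Int) : Int :=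
  if _h : n ≤ 0 then 0
  else PySem.Int.mod n 10 + pvDigitSumB (PySem.Int.floordiv n 10)
termination_by n.toNat
decreasing_by
  rw [PySem.Int.floordiv_eq_ediv_of_pos (by omega : (0:Int) < 10)]
  omega

def getDigitSum_alt (num : Int) : Int :=
  if _h : num ≤ 0 then 0
  else
    let q := PySem.Int.floordiv num 10
    let r := PySem.Int.mod num 10
    10 * getDigitSum_alt (q - 1) + 45 * q + (r + 1) * pvDigitSumB q +
      PySem.Int.floordiv (r * (r + 1)) 2
termination_by num.toNat
decreasing_by
  rw [PySem.Int.floordiv_eq_ediv_of_pos (by omega : (0:Int) < 10)]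
  omega

-- ===== PRECONDITION & SPEC =====
def Spec_getDigitSum (num : Int) (out : Int) : Prop := out = getDigitSum_alt num
instance (num : Int) (out : Int) : Decidable (Spec_getDigitSum num out) := by unfold Spec_getDigitSum; infer_instance

-- ===== CLAIM (what is proved, stated in full; the proofs are below) =====
def Claim_equal_getDigitSum : Prop := ∀ (num : Int), Dom_getDigitSum num → Spec_getDigitSum num (getDigitSum num)

-- ===== LEMMAS AND PROOFS =====

-- digit sum of a natural number
def dsN (n : Nat) : Nat :=
  if h : n = 0 then 0 else n % 10 + dsN (n / 10)
decreasing_by omega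

-- FN n = sum of digit sums of 1..n (the mathematical reference both ports are proved equal to)
def FN : Nat → Nat
  | 0 => 0
  | n + 1 => FN n + dsN (n + 1)

lemma dsN_zero : dsN 0 = 0 := by rw [dsN]; simp

lemma dsN_unfold (n : Nat) : dsN n = n % 10 + dsN (n / 10) := by
  by_cases h : n = 0
  · subst h; simp [dsN_zero]
  · rw [dsN]; simp [h]

lemma FN_zero : FN 0 = 0 := rfl

lemma FN_succ (n : Nat) : FN (n + 1) = FN n + dsN (n + 1) := rfl

lemma dsN_lt10 {d : Nat} (h : d < 10) : dsN d = d := by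
  rw [dsN_unfold, Nat.mod_eq_of_lt h, Nat.div_eq_of_lt h, dsN_zero]
  omega

lemma dsN_split : ∀ (p d s : Nat), d < 10 → s < 10 ^ p → dsN (d * 10 ^ p + s) = d + dsN s := by
  intro p
  induction p with
  | zero =>
    intro d s hd hs
    interval_cases s
    simp [dsN_lt10 hd, dsN_zero]
  | succ p ih =>
    intro d s hd hs
    have hpow : (10:Nat) ^ (p + 1) = 10 * 10 ^ p := by ring
    rw [dsN_unfold]
    have h1 : (d * 10 ^ (p + 1) + s) % 10 = s % 10 := by
      rw [hpow]
      have : d * (10 * 10 ^ p) = 10 * (d * 10 ^ p) := by ring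
      rw [this]
      omega
    have h2 : (d * 10 ^ (p + 1) + s) / 10 = d * 10 ^ p + s / 10 := by
      rw [hpow]
      have : d * (10 * 10 ^ p) = 10 * (d * 10 ^ p) := by ring
      rw [this]
      omega
    have hs10 : s / 10 < 10 ^ p := by
      rw [hpow] at hs; omega
    rw [h1, h2, ih d (s / 10) hd hs10, dsN_unfold s]
    omega

lemma FN_pred (k : Nat) : FN k = FN (k - 1) + dsN k := by
  cases k with
  | zero => simp [FN, dsN_zero]
  | succ n => simp [FN]

-- block lemma: peel off the top digit d (numbers d*10^p .. d*10^p + r on top of 0..r)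
lemma blockL : ∀ (p d : Nat), d < 10 → ∀ r, r < 10 ^ p →
    FN (d * 10 ^ p + r) =
      (Finset.range d).sum (fun i => i * 10 ^ p) + d * FN (10 ^ p - 1) + d * (r + 1) + FN r := by
  intro p d
  induction d with
  | zero => intro _ r _; simp
  | succ d ihd =>
    intro hd
    have hd' : d < 10 := by omega
    have hpow : 1 ≤ (10:Nat) ^ p := Nat.one_le_pow _ _ (by omega)
    intro r
    induction r with
    | zero =>
      intro _
      have key : (d + 1) * 10 ^ p + 0 = (d * 10 ^ p + (10 ^ p - 1)) + 1 := by
        have : (d + 1) * 10 ^ p = d * 10 ^ p + 10 ^ p := by ring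
        omega
      rw [key, FN_succ, ihd hd' (10 ^ p - 1) (by omega)]
      have hds : dsN (d * 10 ^ p + (10 ^ p - 1) + 1) = d + 1 := by
        have : d * 10 ^ p + (10 ^ p - 1) + 1 = (d + 1) * 10 ^ p + 0 := by omega
        rw [this, dsN_split p (d + 1) 0 hd (by omega), dsN_zero]
      have h1 : d * (10 ^ p - 1 + 1) = d * 10 ^ p := by
        congr 1; omega
      rw [hds, Finset.sum_range_succ, h1, FN_zero]
      ring
    | succ r ihr =>
      intro hr
      have hr' : r < 10 ^ p := by omega
      have key : (d + 1) * 10 ^ p + (r + 1) = ((d + 1) * 10 ^ p + r) + 1 := by omega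
      rw [key, FN_succ, ihr hr']
      have hds : dsN ((d + 1) * 10 ^ p + r + 1) = (d + 1) + dsN (r + 1) := by
        have : (d + 1) * 10 ^ p + r + 1 = (d + 1) * 10 ^ p + (r + 1) := by omega
        rw [this, dsN_split p (d + 1) (r + 1) hd hr]
      rw [hds, FN_pred (r + 1)]
      simp only [Nat.add_sub_cancel]
      ring

-- sum of digit sums over a full block 0..10^p-1
lemma FN_pow_sub_one : ∀ p : Nat, FN (10 ^ p - 1) = 45 * p * 10 ^ (p - 1) := by
  intro p
  induction p with
  | zero => simp [FN]
  | succ p ih =>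
    have hpow : 1 ≤ (10:Nat) ^ p := Nat.one_le_pow _ _ (by omega)
    have key : 10 ^ (p + 1) - 1 = 9 * 10 ^ p + (10 ^ p - 1) := by
      have : (10:Nat) ^ (p + 1) = 10 * 10 ^ p := by ring
      omega
    rw [key, blockL p 9 (by omega) (10 ^ p - 1) (by omega), ih]
    have hsum : (Finset.range 9).sum (fun i => i * 10 ^ p) = 36 * 10 ^ p := by
      simp [Finset.sum_range_succ]
      ring
    rw [hsum]
    cases p with
    | zero => simp
    | succ q =>
      simp only [Nat.add_sub_cancel]
      have h1 : 9 * (10 ^ (q + 1) - 1 + 1) = 9 * 10 ^ (q + 1) := by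
        congr 1; omega
      rw [h1]
      have : (10:Nat) ^ (q + 1) = 10 * 10 ^ q := by ring
      rw [this]
      ring

-- closed form of A's inner loop
lemma inner_eq : ∀ (d : Nat) (p : Nat) (c : Int),
    pvInner p ((d : Nat) : Int) c =
      c + ((Finset.range d).sum (fun i => i * 10 ^ p) : Nat) +
        (d : Int) * (if 0 < p then 45 * (p : Int) * (10 : Int) ^ (p - 1) else 0) := by
  intro d
  induction d with
  | zero =>
    intro p c
    simp [pvInner]
  | succ d ih =>
    intro p c
    have hcast : (((d + 1 : Nat)) : Int) = ((d : Nat) : Int) + 1 := by push_cast; ring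
    rw [pvInner, hcast, PySem.List.pyRange_one_succ_right (by positivity)]
    rw [List.foldl_append]
    have := ih p c
    rw [pvInner] at this
    rw [this]
    simp only [List.foldl_cons, List.foldl_nil, Finset.sum_range_succ]
    push_cast
    split_ifs <;> ring

-- the main loop of A computes FN of the remaining number
lemma loopA_eq : ∀ (p : Nat) (c n : Int), 0 ≤ n → n < 10 ^ (p + 1) →
    pvLoopA p c n = c + (FN n.toNat : Int) := by
  intro p
  induction p with
  | zero =>
    intro c n hn hn10
    have hm : n = ((n.toNat : Nat) : Int) := by omega
    set m := n.toNat with hmdef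
    have hm10 : m < 10 := by omega
    rw [pvLoopA]
    simp only [pow_zero]
    have hfd : PySem.Int.floordiv n 1 = n := by
      rw [PySem.Int.floordiv_eq_ediv_of_pos (by omega)]; omega
    have hmod : PySem.Int.mod n 1 = 0 := by
      rw [PySem.Int.mod_eq_emod_of_pos (by omega)]; omega
    rw [hfd, hmod]
    rw [hm, inner_eq m 0 c]
    have hFN : FN m = (Finset.range m).sum (fun i => i * 10 ^ 0) + m * FN (10 ^ 0 - 1) + m * (0 + 1) + FN 0 := by
      have := blockL 0 m hm10 0 (by omega)
      simpa using this
    simp only [pow_zero, mul_one, Nat.sub_self] at hFN ⊢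
    rw [hFN, FN_zero]
    push_cast
    ring
  | succ p ih =>
    intro c n hn hn10
    set m := n.toNat with hmdef
    have hm : n = ((m : Nat) : Int) := by omega
    have hpowpos : (0:Int) < 10 ^ (p + 1) := by positivity
    have hpowcast : ((10 : Int) ^ (p + 1)) = (((10 ^ (p + 1) : Nat)) : Int) := by push_cast; ring
    set d := m / 10 ^ (p + 1) with hddef
    set r := m % 10 ^ (p + 1) with hrdef
    have hmN : m < 10 ^ (p + 1 + 1) := by
      have hc : (10:Int) ^ (p + 1 + 1) = ((10 ^ (p + 1 + 1) : Nat) : Int) := by push_cast; ring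
      rw [hm, hc] at hn10
      exact_mod_cast hn10
    have hd10 : d < 10 := by
      rw [hddef, Nat.div_lt_iff_lt_mul (by positivity)]
      have h2 : (10:Nat) ^ (p + 1 + 1) = 10 * 10 ^ (p + 1) := by ring
      omega
    have hr10 : r < 10 ^ (p + 1) := Nat.mod_lt _ (by positivity)
    have hfd : PySem.Int.floordiv n ((10:Int) ^ (p + 1)) = ((d : Nat) : Int) := by
      rw [hm, hpowcast]
      exact_mod_cast PySem.Int.floordiv_natCast m (10 ^ (p + 1))
    have hmod : PySem.Int.mod n ((10:Int) ^ (p + 1)) = ((r : Nat) : Int) := by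
      rw [hm, hpowcast]
      exact_mod_cast PySem.Int.mod_natCast m (10 ^ (p + 1))
    rw [pvLoopA]
    simp only [hfd, hmod]
    rw [ih _ ((r : Nat) : Int) (by positivity) (by exact_mod_cast Nat.cast_lt.mpr hr10)]
    rw [inner_eq d (p + 1) c]
    have hFN : FN m = (Finset.range d).sum (fun i => i * 10 ^ (p + 1)) + d * FN (10 ^ (p + 1) - 1) + d * (r + 1) + FN r := by
      have hsplit : d * 10 ^ (p + 1) + r = m := by
        rw [hddef, hrdef, Nat.mul_comm]
        exact Nat.div_add_mod m _
      rw [← hsplit]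
      exact blockL (p + 1) d hd10 r hr10
    have h45 : FN (10 ^ (p + 1) - 1) = 45 * (p + 1) * 10 ^ p := by
      have := FN_pow_sub_one (p + 1)
      simpa using this
    have htoNat : (((r : Nat) : Int)).toNat = r := by omega
    rw [htoNat, hFN, h45]
    simp only [Nat.add_sub_cancel, if_pos (by omega : 0 < p + 1)]
    push_cast
    ring

-- the top-power search yields a power bounding the number
lemma findNow_bound : ∀ (fuel : Nat) (n : Int), 1 ≤ n → n < 10 ^ (fuel + 1) →
    n < 10 ^ (pvFindNow n fuel + 1) := by
  intro fuel
  induction fuel with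
  | zero => intro n _ h; simpa [pvFindNow] using h
  | succ f ih =>
    intro n hn h
    rw [pvFindNow]
    split_ifs with hcond
    · apply ih n hn
      rw [PySem.Int.floordiv_eq_ediv_of_pos (by positivity)] at hcond
      have hpos : (0:Int) < 10 ^ (f + 1) := by positivity
      by_contra hge
      have h1 : (1:Int) ≤ n / 10 ^ (f + 1) := by
        rw [Int.le_ediv_iff_mul_le hpos]; omega
      omega
    · exact h

-- A equals the reference on positive inputs ≤ 2^31
lemma A_eq_FN (n : Int) (h1 : 1 ≤ n) (h2 : n ≤ 2147483648) : getDigitSum n = (FN n.toNat : Int) := by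
  rw [getDigitSum, if_neg (by omega)]
  have hb : n < 10 ^ (16 + 1) := by norm_num; omega
  have hfind := findNow_bound 16 n h1 hb
  rw [loopA_eq (pvFindNow n 16) 0 n (by omega) hfind]
  ring

-- B's digit-sum helper equals dsN
lemma dsB_eq : ∀ m : Nat, pvDigitSumB ((m : Nat) : Int) = (dsN m : Int) := by
  intro m
  induction m using Nat.strong_induction_on with
  | _ m ih =>
    by_cases h0 : m = 0
    · subst h0; rw [pvDigitSumB]; simp [dsN_zero]
    · rw [pvDigitSumB]
      rw [dif_neg (by omega)]
      have hfd : PySem.Int.floordiv ((m : Nat) : Int) 10 = ((m / 10 : Nat) : Int) := by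
        exact_mod_cast PySem.Int.floordiv_natCast m 10
      have hmod : PySem.Int.mod ((m : Nat) : Int) 10 = ((m % 10 : Nat) : Int) := by
        exact_mod_cast PySem.Int.mod_natCast m 10
      rw [hfd, hmod, ih (m / 10) (by omega), dsN_unfold m]
      push_cast
      ring

-- the recurrence FN satisfies (B's recursion)
lemma FN_rec : ∀ m : Nat, 1 ≤ m →
    FN m = 10 * FN (m / 10 - 1) + 45 * (m / 10) + (m % 10 + 1) * dsN (m / 10) +
      (m % 10) * (m % 10 + 1) / 2 := by
  intro m
  induction m with
  | zero => omega
  | succ m ihm =>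
    intro _
    by_cases hm0 : m = 0
    · subst hm0
      norm_num
      rw [show FN 1 = FN 0 + dsN 1 from rfl, FN_zero, dsN_lt10 (by omega), dsN_zero]
    · have ih := ihm (by omega)
      set q := (m + 1) / 10 with hq
      set r := (m + 1) % 10 with hr
      have hqr : m + 1 = 10 * q + r ∧ r < 10 := by omega
      by_cases hr0 : r = 0
      · -- m + 1 = 10q, m = 10(q-1)+9
        have hq1 : 1 ≤ q := by omega
        have hmdiv : m / 10 = q - 1 := by omega
        have hmmod : m % 10 = 9 := by omega
        rw [FN_pred (m + 1)]
        simp only [Nat.add_sub_cancel]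
        rw [ih, hmdiv, hmmod]
        have hds : dsN (m + 1) = dsN q := by
          rw [dsN_unfold (m + 1)]
          have h1 : (m + 1) % 10 = 0 := by omega
          have h2 : (m + 1) / 10 = q := by omega
          rw [h1, h2]; omega
        have hFNq : FN (q - 1) = FN (q - 1 - 1) + dsN (q - 1) := FN_pred _
        rw [hds, hr0]
        omega
      · -- r ≥ 1: m/10 = q, m%10 = r-1
        have hmdiv : m / 10 = q := by omega
        have hmmod : m % 10 = r - 1 := by omega
        rw [FN_pred (m + 1)]
        simp only [Nat.add_sub_cancel]
        rw [ih, hmdiv, hmmod]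
        have hds : dsN (m + 1) = r + dsN q := by
          rw [dsN_unfold (m + 1)]
        have hrr : r - 1 + 1 = r := by omega
        rw [hds, hrr]
        have e2 : (r + 1) * dsN q = r * dsN q + dsN q := by ring
        have e3 : r * (r + 1) = (r - 1) * r + 2 * r := by
          obtain ⟨r', hr'⟩ : ∃ r', r = r' + 1 := ⟨r - 1, by omega⟩
          rw [hr']
          simp only [Nat.add_sub_cancel]
          ring
        have e4 : 2 ∣ (r - 1) * r := by
          have := Nat.even_mul_succ_self (r - 1)
          rw [hrr] at this
          exact this.two_dvd
        omega

-- B equals the reference on naturals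
lemma B_eq_FN : ∀ m : Nat, getDigitSum_alt ((m : Nat) : Int) = (FN m : Int) := by
  intro m
  induction m using Nat.strong_induction_on with
  | _ m ih =>
    by_cases h0 : m = 0
    · subst h0; rw [getDigitSum_alt]; simp [FN]
    · rw [getDigitSum_alt, dif_neg (by omega)]
      have hfd : PySem.Int.floordiv ((m : Nat) : Int) 10 = ((m / 10 : Nat) : Int) := by
        exact_mod_cast PySem.Int.floordiv_natCast m 10
      have hmod : PySem.Int.mod ((m : Nat) : Int) 10 = ((m % 10 : Nat) : Int) := by
        exact_mod_cast PySem.Int.mod_natCast m 10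
      simp only [hfd, hmod]
      have hrec : getDigitSum_alt (((m / 10 : Nat) : Int) - 1) = (FN (m / 10 - 1) : Int) := by
        by_cases hq0 : m / 10 = 0
        · rw [hq0]
          rw [getDigitSum_alt]
          simp [FN]
        · have : (((m / 10 : Nat) : Int) - 1) = ((m / 10 - 1 : Nat) : Int) := by omega
          rw [this, ih (m / 10 - 1) (by omega)]
      have htri2 : PySem.Int.floordiv (((m % 10 : Nat) : Int) * (((m % 10 : Nat) : Int) + 1)) 2 =
          (((m % 10) * (m % 10 + 1) / 2 : Nat) : Int) := by
        have : (((m % 10 : Nat) : Int) * (((m % 10 : Nat) : Int) + 1)) = (((m % 10) * (m % 10 + 1) : Nat) : Int) := by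
          push_cast; ring
        rw [this]
        exact_mod_cast PySem.Int.floordiv_natCast ((m % 10) * (m % 10 + 1)) 2
      rw [hrec, dsB_eq (m / 10), htri2, FN_rec m (by omega)]
      push_cast
      ring

-- ===== VERDICT (by name: the statement is the Claim_ definition above) =====
theorem getDigitSum_spec : Claim_equal_getDigitSum := by
  intro num hdom
  unfold Spec_getDigitSum
  by_cases hle : num ≤ 0
  · rw [getDigitSum, if_pos hle, getDigitSum_alt, dif_pos hle]
  · have h1 : 1 ≤ num := by omega
    have h2 : num ≤ 2147483648 := by
      unfold Dom_getDigitSum pvDomInt at hdom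
      simpa using (of_decide_eq_true hdom).2
    have hm : num = ((num.toNat : Nat) : Int) := by omega
    rw [A_eq_FN num h1 h2, hm, B_eq_FN num.toNat]
    have h3 : ((num.toNat : Int)).toNat = num.toNat := by omega
    rw [h3]
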